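-- pv_equiv track=rewrite | github.com/kaxixi/proactive-assistant | availability.py | _subtract_intervals
-- ===== SOURCE A (Python) =====
-- def _subtract_intervals(
--     free: list[tuple[int, int]], blocked: list[tuple[int, int]]
-- ) -> list[tuple[int, int]]:
--     """Subtract blocked intervals from free intervals."""
--     result = []
--     for fs, fe in free:
--         remaining = [(fs, fe)]
--         for bs, be in blocked:
--             new_remaining = []
--             for rs, re in remaining:
--                 if be <= rs or bs >= re:
--                     new_remaining.append((rs, re))
--                 else:
--                     if rs < bs:
--                         new_remaining.append((rs, bs))
--                     if be < re:
--                         new_remaining.append((be, re))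
--             remaining = new_remaining
--         result.extend(remaining)
--     return result
-- ===== SOURCE B (Python) =====
-- def _subtract_intervals(
--     free: list[tuple[int, int]], blocked: list[tuple[int, int]]
-- ) -> list[tuple[int, int]]:
--     """Subtract blocked intervals from free intervals (recursive carve)."""
--
--     def carve(lo, hi, i):
--         # remaining pieces of (lo, hi) after subtracting blocked[i:]
--         if i == len(blocked):
--             return [(lo, hi)]
--         bs, be = blocked[i]
--         if be <= lo or bs >= hi:
--             return carve(lo, hi, i + 1)
--         pieces = []
--         if lo < bs:
--             pieces += carve(lo, bs, i + 1)
--         if be < hi: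
--             pieces += carve(be, hi, i + 1)
--         return pieces
--
--     out = []
--     for fs, fe in free:
--         out += carve(fs, fe, 0)
--     return out
-- ===== Notes on version B (the rewrite author's own statement) =====
-- stated objective: simpler
-- what changed: Replaces A's breadth-first triple loop (rebuilding the whole 'remaining' worklist once per blocked interval) by a direct depth-first recursion that carves one free interval against the blocked list; the worklist and its per-pass list rebuilds disappear.
import Mathlib
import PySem

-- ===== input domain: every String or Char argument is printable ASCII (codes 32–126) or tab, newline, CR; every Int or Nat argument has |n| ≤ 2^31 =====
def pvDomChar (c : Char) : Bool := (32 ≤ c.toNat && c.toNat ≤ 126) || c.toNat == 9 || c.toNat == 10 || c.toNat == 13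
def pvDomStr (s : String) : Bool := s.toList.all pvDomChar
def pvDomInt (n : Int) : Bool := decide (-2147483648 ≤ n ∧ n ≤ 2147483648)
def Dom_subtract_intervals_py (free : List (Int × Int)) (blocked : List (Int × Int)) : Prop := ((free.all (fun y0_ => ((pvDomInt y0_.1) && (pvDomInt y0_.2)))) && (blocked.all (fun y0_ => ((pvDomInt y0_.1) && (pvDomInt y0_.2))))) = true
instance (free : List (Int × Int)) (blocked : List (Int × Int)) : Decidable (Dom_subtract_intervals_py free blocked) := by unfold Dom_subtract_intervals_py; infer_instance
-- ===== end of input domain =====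

-- B replaces A's per-blocked-interval rebuild of the whole worklist by a direct
-- depth-first recursive carve of each free interval; same values, simpler structure.

-- ===== PORT A =====
-- literal transliteration of A: outer loop over free, middle loop over blocked,
-- inner loop rebuilding 'remaining' into 'new_remaining'
def subtract_intervals_py (free : List (Int × Int)) (blocked : List (Int × Int)) : List (Int × Int) :=
  free.foldl (fun result f =>
    let remaining :=
      blocked.foldl (fun remaining b =>
        remaining.foldl (fun new_remaining r =>
          if b.2 ≤ r.1 ∨ b.1 ≥ r.2 then
            new_remaining ++ [r]
          else
            (new_remaining ++ (if r.1 < b.1 then [(r.1, b.1)] else [])) ++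
              (if b.2 < r.2 then [(b.2, r.2)] else [])) []) [f]
    result ++ remaining) []

-- ===== PORT B =====
-- B's helper carve(lo, hi, i): pieces of (lo, hi) left after subtracting blocked[i:];
-- ported as structural recursion on the suffix of the blocked list
def carve (lo hi : Int) : List (Int × Int) → List (Int × Int)
  | [] => [(lo, hi)]
  | (bs, be) :: rest =>
    if be ≤ lo ∨ bs ≥ hi then carve lo hi rest
    else (if lo < bs then carve lo bs rest else []) ++ (if be < hi then carve be hi rest else [])

def subtract_intervals_py_alt (free : List (Int × Int)) (blocked : List (Int × Int)) : List (Int × Int) :=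
  free.foldl (fun out f => out ++ carve f.1 f.2 blocked) []

-- ===== PRECONDITION & SPEC =====
def Spec_subtract_intervals_py (free : List (Int × Int)) (blocked : List (Int × Int)) (out : List (Int × Int)) : Prop := out = subtract_intervals_py_alt free blocked
instance (free : List (Int × Int)) (blocked : List (Int × Int)) (out : List (Int × Int)) : Decidable (Spec_subtract_intervals_py free blocked out) := by unfold Spec_subtract_intervals_py; infer_instance

-- ===== CLAIM (what is proved, stated in full; the proofs are below) =====
def Claim_equal_subtract_intervals_py : Prop := ∀ (free : List (Int × Int)) (blocked : List (Int × Int)), Dom_subtract_intervals_py free blocked → Spec_subtract_intervals_py free blocked (subtract_intervals_py free blocked)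

-- ===== LEMMAS AND PROOFS =====

-- what one pass of A's middle loop keeps of a single piece r when subtracting b
def step (b r : Int × Int) : List (Int × Int) :=
  if b.2 ≤ r.1 ∨ b.1 ≥ r.2 then [r]
  else (if r.1 < b.1 then [(r.1, b.1)] else []) ++ (if b.2 < r.2 then [(b.2, r.2)] else [])

-- A's inner loop is 'extend with step b r' over the worklist
theorem inner_pass_eq (b : Int × Int) (rem : List (Int × Int)) :
    rem.foldl (fun new_remaining r =>
      if b.2 ≤ r.1 ∨ b.1 ≥ r.2 then
        new_remaining ++ [r]
      else
        (new_remaining ++ (if r.1 < b.1 then [(r.1, b.1)] else [])) ++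
          (if b.2 < r.2 then [(b.2, r.2)] else [])) [] = rem.flatMap (step b) := by
  have h : (fun (new_remaining : List (Int × Int)) (r : Int × Int) =>
      if b.2 ≤ r.1 ∨ b.1 ≥ r.2 then
        new_remaining ++ [r]
      else
        (new_remaining ++ (if r.1 < b.1 then [(r.1, b.1)] else [])) ++
          (if b.2 < r.2 then [(b.2, r.2)] else []))
      = fun acc r => acc ++ step b r := by
    funext acc r
    unfold step
    split_ifs <;> simp
  rw [h, PySem.List.foldl_append_eq_flatMap]
  simp

-- splitting r by b and then carving the pieces against the rest is carving r against b :: rest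
theorem step_flatMap_carve (b : Int × Int) (rest : List (Int × Int)) (r : Int × Int) :
    (step b r).flatMap (fun p => carve p.1 p.2 rest) = carve r.1 r.2 (b :: rest) := by
  obtain ⟨bs, be⟩ := b
  simp only [carve]
  unfold step
  split_ifs <;> simp

-- A's middle loop over the blocked list equals carving each worklist piece depth-first
theorem passes_eq_carve (blocked : List (Int × Int)) (rem : List (Int × Int)) :
    blocked.foldl (fun remaining b =>
      remaining.foldl (fun new_remaining r =>
        if b.2 ≤ r.1 ∨ b.1 ≥ r.2 then
          new_remaining ++ [r]
        else
          (new_remaining ++ (if r.1 < b.1 then [(r.1, b.1)] else [])) ++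
            (if b.2 < r.2 then [(b.2, r.2)] else [])) []) rem
    = rem.flatMap (fun r => carve r.1 r.2 blocked) := by
  induction blocked generalizing rem with
  | nil => simp [carve]
  | cons b rest ih =>
    rw [List.foldl_cons, inner_pass_eq, ih, List.flatMap_assoc]
    exact List.flatMap_congr (fun r _ => step_flatMap_carve b rest r)

-- ===== VERDICT (by name: the statement is the Claim_ definition above) =====
theorem subtract_intervals_py_spec : Claim_equal_subtract_intervals_py := by
  intro free blocked _
  unfold Spec_subtract_intervals_py subtract_intervals_py subtract_intervals_py_alt
  simp only [passes_eq_carve, List.flatMap_cons, List.flatMap_nil, List.append_nil]
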